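-- pv_equiv track=rewrite | github.com/Sovik89/Scaler_inter_n_advanced | advanced_dp_maximum_non_adjacent_sum.py | adjacent_max_sum
-- ===== SOURCE A (Python) =====
-- def adjacent_max_sum(array,i,dp):
--     if i==0:
--         if dp[0]==0:
--             dp[0]=max(array[0][i],array[1][i])
--             return dp[0]
--
--     elif i==1:
--         if dp[1]==0:
--             dp[1]=max(adjacent_max_sum(array,i-1,dp),max(array[1][i],array[0][i]))
--             return dp[1]
--
--     if dp[i]==0:
--         dp[i]=max((adjacent_max_sum(array,i-2,dp)+max(array[0][i],array[1][i])),adjacent_max_sum(array,i-1,dp))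
--
--     return dp[i]
-- ===== SOURCE B (Python) =====
-- def adjacent_max_sum(array, i, dp):
--     if dp[i] != 0:
--         return dp[i]
--     for j in range(i + 1):
--         if dp[j] == 0:
--             col = max(array[0][j], array[1][j])
--             if j == 0:
--                 dp[j] = col
--             elif j == 1:
--                 dp[j] = max(dp[0], col)
--             else:
--                 dp[j] = max(dp[j - 2] + col, dp[j - 1])
--     return dp[i]
-- ===== Notes on version B (the rewrite author's own statement) =====
-- stated objective: simpler
-- what changed: A's top-down memoised recursion (with the i==0/i==1 special-case branches and recursive calls threading the mutated dp) is replaced by a single bottom-up forward loop over j=0..i that fills each still-zero dp entry once from the two already-computed predecessors.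
-- outside the precondition, e.g. on adjacent_max_sum([[1, 2, 9], [3, 4, 8]], -1, [1, 3, 0]): A returns 10, B returns 0
import Mathlib
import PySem

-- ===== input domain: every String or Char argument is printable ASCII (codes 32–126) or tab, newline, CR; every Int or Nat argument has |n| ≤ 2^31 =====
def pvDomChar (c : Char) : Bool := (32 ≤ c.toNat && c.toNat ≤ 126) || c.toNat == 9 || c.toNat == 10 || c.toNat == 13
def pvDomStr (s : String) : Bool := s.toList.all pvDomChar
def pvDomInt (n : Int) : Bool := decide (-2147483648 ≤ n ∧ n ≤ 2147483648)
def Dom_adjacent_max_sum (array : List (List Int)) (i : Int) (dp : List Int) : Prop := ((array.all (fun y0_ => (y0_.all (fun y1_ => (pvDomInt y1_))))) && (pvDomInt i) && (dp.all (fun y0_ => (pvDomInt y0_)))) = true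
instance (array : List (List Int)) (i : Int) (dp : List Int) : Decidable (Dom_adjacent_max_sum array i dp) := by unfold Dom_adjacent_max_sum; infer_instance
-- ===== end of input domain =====

-- B replaces A's top-down memoised recursion by a single bottom-up forward loop (simpler);
-- A mutates dp in place and B mutates dp too, but possibly at different entries (A skips entries
-- its memo cuts never reach): the equivalence proved here is about the RETURN value only.

-- ===== PORT A =====
-- Python dict-free helpers shared by both ports: dp[i] read (negative indices, 0 on the
-- untested out-of-range case), dp[i]=v write, and array[r][i].
def pvGetI (dp : List Int) (i : Int) : Int := (PySem.List.pyGet? dp i).getD 0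
def pvSetI (dp : List Int) (i : Int) (v : Int) : List Int :=
  dp.set (if i < 0 then (dp.length + i).toNat else i.toNat) v
def aGetI (array : List (List Int)) (r : Int) (i : Int) : Int :=
  pvGetI ((PySem.List.pyGet? array r).getD []) i

-- A's recursion, fuel-indexed (the Python recursion terminates on every input Pre_ admits and
-- fuel i.toNat+1 suffices there); the mutated dp list is threaded through as state.
def goA : Nat → List (List Int) → Int → List Int → Int × List Int
  | 0, _, _, dp => (0, dp)
  | fuel+1, array, i, dp =>
    if i = 0 ∧ pvGetI dp 0 = 0 then
      let dp1 := pvSetI dp 0 (max (aGetI array 0 i) (aGetI array 1 i))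
      (pvGetI dp1 0, dp1)
    else if i = 1 ∧ pvGetI dp 1 = 0 then
      let p := goA fuel array (i-1) dp
      let dp1 := pvSetI p.2 1 (max p.1 (max (aGetI array 1 i) (aGetI array 0 i)))
      (pvGetI dp1 1, dp1)
    else if pvGetI dp i = 0 then
      let p2 := goA fuel array (i-2) dp
      let c := max (aGetI array 0 i) (aGetI array 1 i)
      let p1 := goA fuel array (i-1) p2.2
      let dp1 := pvSetI p1.2 i (max (p2.1 + c) p1.1)
      (pvGetI dp1 i, dp1)
    else (pvGetI dp i, dp)

def adjacent_max_sum (array : List (List Int)) (i : Int) (dp : List Int) : Int :=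
  (goA (i.toNat + 1) array i dp).1

-- ===== PORT B =====
-- one loop body: `if dp[j]==0: compute col and val, dp[j]=val`
def stepB (array : List (List Int)) (dp : List Int) (j : Int) : List Int :=
  if pvGetI dp j = 0 then
    let col := max (aGetI array 0 j) (aGetI array 1 j)
    let v := if j = 0 then col
             else if j = 1 then max (pvGetI dp 0) col
             else max (pvGetI dp (j-2) + col) (pvGetI dp (j-1))
    pvSetI dp j v
  else dp

def adjacent_max_sum_alt (array : List (List Int)) (i : Int) (dp : List Int) : Int :=
  if pvGetI dp i ≠ 0 then pvGetI dp i
  else pvGetI ((PySem.List.pyRange 0 (i+1) 1).foldl (stepB array) dp) i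

-- ===== PRECONDITION & SPEC =====
-- Pre_ admits a nonzero memo entry dp[i] (any i, including Python's negative indexing: A
-- returns it immediately), or else the natural DP domain 0 ≤ i with dp[i] in range and two
-- array rows of length > i (exactly what A's recursion touches when dp[i]==0).
-- Excluded: negative i with dp[i]==0, where A recurses by negative-index wraparound and
-- raises IndexError or returns an accidental value depending on dp's contents, while B's
-- forward loop does not run; and shapes on which A raises (dp[i] out of range, missing rows).
def Pre_adjacent_max_sum (array : List (List Int)) (i : Int) (dp : List Int) : Prop :=
  pvGetI dp i ≠ 0 ∨
    (0 ≤ i ∧ i < (dp.length : Int) ∧ 2 ≤ array.length ∧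
      i < ((array.getD 0 []).length : Int) ∧ i < ((array.getD 1 []).length : Int))

instance (array : List (List Int)) (i : Int) (dp : List Int) : Decidable (Pre_adjacent_max_sum array i dp) := by unfold Pre_adjacent_max_sum; infer_instance

def pvWitness_adjacent_max_sum : List (List Int) × Int × List Int := ([[1, 2], [3, 4]], 1, [0, 0])

def Spec_adjacent_max_sum (array : List (List Int)) (i : Int) (dp : List Int) (out : Int) : Prop := out = adjacent_max_sum_alt array i dp
instance (array : List (List Int)) (i : Int) (dp : List Int) (out : Int) : Decidable (Spec_adjacent_max_sum array i dp out) := by unfold Spec_adjacent_max_sum; infer_instance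

-- ===== CLAIM (what is proved, stated in full; the proofs are below) =====
def Claim_equal_adjacent_max_sum : Prop := ∀ (array : List (List Int)) (i : Int) (dp : List Int), Dom_adjacent_max_sum array i dp → Pre_adjacent_max_sum array i dp → Spec_adjacent_max_sum array i dp (adjacent_max_sum array i dp)

-- ===== LEMMAS AND PROOFS =====

-- Nat-indexed read of a dp entry (0 when out of range, like Python never is inside Pre_)
def nget (dp : List Int) (k : Nat) : Int := dp.getD k 0

-- the common value both programs compute: the memoised non-adjacent-sum recurrence read off
-- the INITIAL dp (nonzero entries are taken as given, zero entries follow the recurrence)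
def pvF (array : List (List Int)) (dp0 : List Int) : Nat → Int
  | 0 => if nget dp0 0 = 0 then max (aGetI array 0 0) (aGetI array 1 0) else nget dp0 0
  | 1 => if nget dp0 1 = 0
      then max (pvF array dp0 0) (max (aGetI array 0 1) (aGetI array 1 1))
      else nget dp0 1
  | (j+2) => if nget dp0 (j+2) = 0
      then max (pvF array dp0 j + max (aGetI array 0 ((j:Int)+2)) (aGetI array 1 ((j:Int)+2)))
               (pvF array dp0 (j+1))
      else nget dp0 (j+2)

theorem pvGetI_natCast (dp : List Int) (k : Nat) : pvGetI dp (k : Int) = nget dp k := by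
  simp [pvGetI, nget, PySem.List.pyGet?_natCast, List.getD]

theorem pvGetI_zero (dp : List Int) : pvGetI dp 0 = nget dp 0 := by
  simpa using pvGetI_natCast dp 0

theorem pvGetI_one (dp : List Int) : pvGetI dp 1 = nget dp 1 := by
  simpa using pvGetI_natCast dp 1

theorem pvSetI_natCast (dp : List Int) (k : Nat) (v : Int) :
    pvSetI dp (k : Int) v = dp.set k v := by
  simp [pvSetI, show ¬ ((k : Int) < 0) by omega]

theorem pvSetI_zero (dp : List Int) (v : Int) : pvSetI dp 0 v = dp.set 0 v := by
  simpa using pvSetI_natCast dp 0 v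

theorem pvSetI_one (dp : List Int) (v : Int) : pvSetI dp 1 v = dp.set 1 v := by
  simpa using pvSetI_natCast dp 1 v

theorem nget_set_self (dp : List Int) (k : Nat) (v : Int) (hk : k < dp.length) :
    nget (dp.set k v) k = v := by
  simp [nget, List.getD, hk]

theorem nget_set_ne (dp : List Int) (k m : Nat) (v : Int) (h : k ≠ m) :
    nget (dp.set k v) m = nget dp m := by
  simp [nget, List.getD, List.getElem?_set_ne h]

theorem pvF_of_ne (array : List (List Int)) (dp0 : List Int) (k : Nat)
    (h : nget dp0 k ≠ 0) : pvF array dp0 k = nget dp0 k := by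
  match k with
  | 0 => simp only [pvF]; rw [if_neg h]
  | 1 => simp only [pvF]; rw [if_neg h]
  | (j+2) => simp only [pvF]; rw [if_neg h]

-- the state invariant A's mutation preserves: every dp entry is either untouched or holds pvF
def pvInv (array : List (List Int)) (dp0 dp : List Int) : Prop :=
  dp.length = dp0.length ∧
  ∀ k : Nat, nget dp k = nget dp0 k ∨ (nget dp0 k = 0 ∧ nget dp k = pvF array dp0 k)

theorem pvInv_get_ne (array : List (List Int)) (dp0 dp : List Int)
    (hInv : pvInv array dp0 dp) (k : Nat) (h : nget dp k ≠ 0) :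
    nget dp k = pvF array dp0 k := by
  rcases hInv.2 k with h1 | ⟨_, h2⟩
  · rw [h1, pvF_of_ne]; rwa [← h1]
  · exact h2

theorem pvInv_get_zero (array : List (List Int)) (dp0 dp : List Int)
    (hInv : pvInv array dp0 dp) (k : Nat) (h : nget dp k = 0) :
    nget dp0 k = 0 := by
  rcases hInv.2 k with h1 | ⟨h2, _⟩
  · rwa [← h1]
  · exact h2

theorem pvInv_set (array : List (List Int)) (dp0 dp : List Int)
    (hInv : pvInv array dp0 dp) (k : Nat) (h0 : nget dp0 k = 0) (hk : k < dp0.length) :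
    pvInv array dp0 (dp.set k (pvF array dp0 k)) := by
  refine ⟨by simp [hInv.1], fun m => ?_⟩
  by_cases hm : m = k
  · subst hm
    exact Or.inr ⟨h0, nget_set_self dp m _ (by rw [hInv.1]; omega)⟩
  · rw [nget_set_ne dp k m _ (fun hkm => hm hkm.symm)]
    exact hInv.2 m

-- main lemma on A's side: with enough fuel, under the invariant, goA returns pvF and preserves it
theorem goA_correct (array : List (List Int)) (dp0 : List Int) :
    ∀ (fuel : Nat) (j : Nat) (dp : List Int), j < fuel → j < dp0.length →
      pvInv array dp0 dp →
      (goA fuel array (j : Int) dp).1 = pvF array dp0 j ∧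
        pvInv array dp0 (goA fuel array (j : Int) dp).2 := by
  intro fuel
  induction fuel with
  | zero => intro j dp h; omega
  | succ f ih =>
    intro j dp hfuel hlen hInv
    have hdplen : dp.length = dp0.length := hInv.1
    match j with
    | 0 =>
      by_cases h : pvGetI dp 0 = 0
      · have h0 : nget dp0 0 = 0 :=
          pvInv_get_zero array dp0 dp hInv 0 (by rw [← pvGetI_zero]; exact h)
        have hF : pvF array dp0 0 = max (aGetI array 0 0) (aGetI array 1 0) := by
          simp only [pvF]; rw [if_pos h0]
        simp only [goA, Nat.cast_zero, true_and]
        rw [if_pos h, pvSetI_zero, hF.symm, pvGetI_zero,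
          nget_set_self dp 0 _ (by omega)]
        exact ⟨rfl, pvInv_set array dp0 dp hInv 0 h0 hlen⟩
      · simp only [goA, Nat.cast_zero, true_and]
        rw [if_neg h, if_neg (by norm_num), if_neg h]
        refine ⟨?_, hInv⟩
        rw [pvGetI_zero]
        exact pvInv_get_ne array dp0 dp hInv 0 (by rw [← pvGetI_zero]; exact h)
    | 1 =>
      by_cases h : pvGetI dp 1 = 0
      · have hrec := ih 0 dp (by omega) (by omega) hInv
        have h0 : nget dp0 1 = 0 :=
          pvInv_get_zero array dp0 dp hInv 1 (by rw [← pvGetI_one]; exact h)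
        have hF : pvF array dp0 1
            = max (pvF array dp0 0) (max (aGetI array 0 1) (aGetI array 1 1)) := by
          simp only [pvF]; rw [if_pos h0]
        simp only [goA, Nat.cast_one, true_and]
        rw [if_neg (by norm_num), if_pos h]
        have e1 : (1:Int) - 1 = ((0:Nat) : Int) := by norm_num
        rw [e1]
        have hrec1 := hrec.1
        have hlen2 : (goA f array ((0:Nat):Int) dp).2.length = dp0.length := hrec.2.1
        rw [hrec1, max_comm (aGetI array 1 1) (aGetI array 0 1), hF.symm, pvSetI_one,
          pvGetI_one, nget_set_self _ 1 _ (by omega)]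
        exact ⟨rfl, pvInv_set array dp0 _ hrec.2 1 h0 hlen⟩
      · simp only [goA, Nat.cast_one, true_and]
        rw [if_neg (by norm_num), if_neg h, if_neg h]
        refine ⟨?_, hInv⟩
        rw [pvGetI_one]
        exact pvInv_get_ne array dp0 dp hInv 1 (by rw [← pvGetI_one]; exact h)
    | (m+2) =>
      have hne0 : ¬ (((m+2 : Nat) : Int) = 0) := by push_cast; omega
      have hne1 : ¬ (((m+2 : Nat) : Int) = 1) := by push_cast; omega
      by_cases h : pvGetI dp ((m+2 : Nat) : Int) = 0
      · have h0 : nget dp0 (m+2) = 0 := by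
          apply pvInv_get_zero array dp0 dp hInv (m+2)
          rw [← pvGetI_natCast]; exact h
        have e2 : ((m+2 : Nat) : Int) - 2 = ((m : Nat) : Int) := by push_cast; ring
        have e1 : ((m+2 : Nat) : Int) - 1 = ((m+1 : Nat) : Int) := by push_cast; ring
        have ecol : ((m+2 : Nat) : Int) = (m:Int)+2 := by push_cast; ring
        simp only [goA]
        rw [if_neg (fun hc => hne0 hc.1), if_neg (fun hc => hne1 hc.1), if_pos h, e2, e1]
        have hr2 := ih m dp (by omega) (by omega) hInv
        have hr1 := ih (m+1) (goA f array ((m:Nat):Int) dp).2 (by omega) (by omega) hr2.2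
        have hF : pvF array dp0 (m+2)
            = max (pvF array dp0 m
                    + max (aGetI array 0 ((m+2:Nat):Int)) (aGetI array 1 ((m+2:Nat):Int)))
                  (pvF array dp0 (m+1)) := by
          simp only [pvF]
          rw [if_pos h0, show ((m:Int)+2) = ((m+2:Nat):Int) by push_cast; ring]
        have hlen2 : (goA f array ((m+1:Nat):Int) (goA f array ((m:Nat):Int) dp).2).2.length
            = dp0.length := hr1.2.1
        rw [hr2.1, hr1.1, ← hF, pvSetI_natCast _ (m+2), pvGetI_natCast,
          nget_set_self _ (m+2) _ (by omega)]
        exact ⟨rfl, pvInv_set array dp0 _ hr1.2 (m+2) h0 hlen⟩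
      · simp only [goA]
        rw [if_neg (fun hc => hne0 hc.1), if_neg (fun hc => hne1 hc.1), if_neg h]
        refine ⟨?_, hInv⟩
        rw [pvGetI_natCast]
        exact pvInv_get_ne array dp0 dp hInv (m+2) (by rw [← pvGetI_natCast]; exact h)

-- A returns the memo entry immediately whenever it is nonzero (any i, no recursion)
theorem goA_memo (fuel : Nat) (array : List (List Int)) (i : Int) (dp : List Int)
    (h : pvGetI dp i ≠ 0) : (goA (fuel+1) array i dp).1 = pvGetI dp i := by
  simp only [goA]
  by_cases h0 : i = 0
  · subst h0; rw [if_neg (by simp [h]), if_neg (by norm_num), if_neg h]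
  · by_cases h1 : i = 1
    · subst h1; rw [if_neg (by norm_num), if_neg (by simp [h]), if_neg h]
    · rw [if_neg (by simp [h0]), if_neg (by simp [h1]), if_neg h]

-- main lemma on B's side: after the loop has processed columns 0..n-1, entry k holds pvF k
-- for k < n and the original value otherwise
theorem foldB_inv (array : List (List Int)) (dp0 : List Int) :
    ∀ (n : Nat), n ≤ dp0.length →
      ((PySem.List.pyRange 0 (n : Int) 1).foldl (stepB array) dp0).length = dp0.length ∧
      ∀ k : Nat, nget ((PySem.List.pyRange 0 (n : Int) 1).foldl (stepB array) dp0) k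
        = if k < n then pvF array dp0 k else nget dp0 k := by
  intro n
  induction n with
  | zero =>
    intro _
    rw [show ((0:Nat):Int) = 0 by simp, PySem.List.pyRange_one_eq_nil (by omega)]
    simp
  | succ n ih =>
    intro hn
    obtain ⟨ihlen, ihget⟩ := ih (by omega)
    have hsplit : PySem.List.pyRange 0 ((n+1 : Nat) : Int) 1
        = PySem.List.pyRange 0 (n : Int) 1 ++ [(n : Int)] := by
      rw [show ((n+1 : Nat) : Int) = (n : Int) + 1 by push_cast; ring]
      exact PySem.List.pyRange_one_succ_right (by positivity)
    rw [hsplit, List.foldl_append]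
    set dpn := (PySem.List.pyRange 0 (n : Int) 1).foldl (stepB array) dp0 with hdpn
    have hget_n : pvGetI dpn (n : Int) = nget dp0 n := by
      rw [pvGetI_natCast, ihget n, if_neg (by omega)]
    simp only [List.foldl_cons, List.foldl_nil]
    by_cases h : nget dp0 n = 0
    · -- the loop writes pvF n
      have hv : stepB array dpn (n : Int) = dpn.set n (pvF array dp0 n) := by
        unfold stepB
        rw [if_pos (by rw [hget_n]; exact h)]
        have hval : (if (n:Int) = 0
              then max (aGetI array 0 (n:Int)) (aGetI array 1 (n:Int))
              else if (n:Int) = 1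
              then max (pvGetI dpn 0) (max (aGetI array 0 (n:Int)) (aGetI array 1 (n:Int)))
              else max (pvGetI dpn ((n:Int)-2)
                         + max (aGetI array 0 (n:Int)) (aGetI array 1 (n:Int)))
                       (pvGetI dpn ((n:Int)-1)))
            = pvF array dp0 n := by
          match n with
          | 0 =>
            rw [if_pos (by norm_num)]
            simp only [pvF]; rw [if_pos h, show ((0:Nat):Int) = 0 by simp]
          | 1 =>
            rw [if_neg (by norm_num), if_pos (by norm_num)]
            rw [pvGetI_zero, ihget 0, if_pos (by omega)]
            simp only [pvF]; rw [if_pos h, show ((1:Nat):Int) = 1 by simp]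
          | (m+2) =>
            rw [if_neg (by push_cast; omega), if_neg (by push_cast; omega)]
            rw [show (((m+2:Nat):Int) - 2) = ((m:Nat):Int) by push_cast; ring,
              show (((m+2:Nat):Int) - 1) = ((m+1:Nat):Int) by push_cast; ring,
              pvGetI_natCast, pvGetI_natCast, ihget m, ihget (m+1),
              if_pos (by omega), if_pos (by omega)]
            simp only [pvF]
            rw [if_pos h, show (((m+2:Nat):Int)) = ((m:Int)+2) by push_cast; ring]
        show pvSetI dpn ((n:Nat):Int)
            (if (n:Int) = 0
              then max (aGetI array 0 (n:Int)) (aGetI array 1 (n:Int))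
              else if (n:Int) = 1
              then max (pvGetI dpn 0) (max (aGetI array 0 (n:Int)) (aGetI array 1 (n:Int)))
              else max (pvGetI dpn ((n:Int)-2)
                         + max (aGetI array 0 (n:Int)) (aGetI array 1 (n:Int)))
                       (pvGetI dpn ((n:Int)-1)))
            = dpn.set n (pvF array dp0 n)
        rw [hval]
        exact pvSetI_natCast dpn n _
      rw [hv]
      refine ⟨by simp [ihlen], fun k => ?_⟩
      by_cases hk : k = n
      · subst hk
        rw [nget_set_self dpn k _ (by omega), if_pos (by omega)]
      · rw [nget_set_ne dpn n k _ (by omega), ihget k]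
        by_cases hlt : k < n
        · rw [if_pos hlt, if_pos (by omega)]
        · rw [if_neg hlt, if_neg (by omega)]
    · -- nonzero entry: the loop leaves it, and pvF n equals it
      have hv : stepB array dpn (n : Int) = dpn := by
        unfold stepB; rw [if_neg (by rw [hget_n]; exact h)]
      rw [hv]
      refine ⟨ihlen, fun k => ?_⟩
      rw [ihget k]
      by_cases hk : k = n
      · subst hk
        rw [if_neg (by omega), if_pos (by omega), pvF_of_ne array dp0 k h]
      · by_cases hlt : k < n
        · rw [if_pos hlt, if_pos (by omega)]
        · rw [if_neg hlt, if_neg (by omega)]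

-- ===== VERDICT (by name: the statement is the Claim_ definition above) =====
theorem adjacent_max_sum_spec : Claim_equal_adjacent_max_sum := by
  intro array i dp _ hPre
  unfold Spec_adjacent_max_sum adjacent_max_sum adjacent_max_sum_alt
  by_cases h0 : pvGetI dp i = 0
  · -- the DP case: both sides compute pvF
    rcases hPre with h | ⟨hi, hlen, _, _, _⟩
    · exact absurd h0 h
    rw [if_neg (by simpa using h0)]
    have hiN : i = ((i.toNat : Nat) : Int) := (Int.toNat_of_nonneg hi).symm
    have hlenN : i.toNat < dp.length := by omega
    have hInv0 : pvInv array dp dp := ⟨rfl, fun k => Or.inl rfl⟩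
    have hA := goA_correct array dp (i.toNat + 1) i.toNat dp (by omega) hlenN hInv0
    have hB := foldB_inv array dp (i.toNat + 1) (by omega)
    rw [hiN]
    rw [show ((i.toNat : Nat) : Int) + 1 = ((i.toNat + 1 : Nat) : Int) by push_cast; ring]
    rw [pvGetI_natCast, hB.2 i.toNat, if_pos (by omega)]
    rw [show (((i.toNat : Nat) : Int).toNat + 1) = i.toNat + 1 by rw [Int.toNat_natCast]]
    exact hA.1
  · -- memo hit: both sides return dp[i] unchanged
    rw [if_pos h0]
    exact goA_memo i.toNat array i dp h0
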